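-- pv_equiv track=rewrite | github.com/DmGetun/mp_2022_224-322_python | labMatrixRotate.py | step_right
-- ===== SOURCE A (Python) =====
-- import copy
--
-- def step_right(matrix):
--     matr = copy.deepcopy(matrix)
--     for i in range(len(matrix)):
--         for j in range(len(matrix[0]) - 1):
--             matr[i][j + 1] = matrix[i][j]
--
--     for i in range(len(matrix)):
--         matr[i][0] = matrix[i][len(matr[0]) - 1]
--
--     return matr
-- ===== SOURCE B (Python) =====
-- def step_right(matrix):
--     return [[row[-1]] + row[:-1] for row in matrix]
-- ===== Notes on version B (the rewrite author's own statement) =====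
-- stated objective: simpler
-- what changed: Replaces A's deep copy plus two index-shifting passes with a one-line comprehension building each row as [row[-1]] + row[:-1]; Pre_ excludes non-rectangular matrices and matrices with empty rows: on rows shorter than the first (or empty) A raises IndexError, and on rows longer than the first A's result (rotating only the first-row-width prefix) and B's (rotating each full row) are both defensible readings of an unspecified non-matrix input.
-- outside the precondition, e.g. on step_right([[1, 2], [3, 4, 5]]): A returns [[2, 1], [4, 3, 5]], B returns [[2, 1], [5, 3, 4]]
import Mathlib
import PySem

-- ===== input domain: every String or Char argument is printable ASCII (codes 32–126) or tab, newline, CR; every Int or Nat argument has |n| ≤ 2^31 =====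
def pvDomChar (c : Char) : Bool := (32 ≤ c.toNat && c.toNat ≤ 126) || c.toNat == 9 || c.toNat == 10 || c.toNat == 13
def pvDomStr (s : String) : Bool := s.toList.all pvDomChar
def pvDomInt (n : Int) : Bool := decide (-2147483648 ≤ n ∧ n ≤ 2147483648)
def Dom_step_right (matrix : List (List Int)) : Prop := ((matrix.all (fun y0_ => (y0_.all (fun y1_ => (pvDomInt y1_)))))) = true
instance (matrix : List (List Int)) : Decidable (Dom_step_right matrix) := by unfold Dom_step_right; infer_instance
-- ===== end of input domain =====

-- B builds each row in one comprehension as [row[-1]] + row[:-1] instead of A's deep copy and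
-- two index-shifting passes; objective: simpler, same cost.

-- ===== PORT A =====
def step_right (matrix : List (List Int)) : List (List Int) :=
  -- matr = copy.deepcopy(matrix)  (elements are ints, so a structural copy)
  let matr := matrix
  -- first loop: matr[i][j+1] = matrix[i][j] for j in range(len(matrix[0]) - 1)
  let matr := (List.range matrix.length).foldl (fun acc i =>
    (List.range ((matrix.headD []).length - 1)).foldl (fun acc2 j =>
      acc2.set i ((acc2.getD i []).set (j+1) ((matrix.getD i []).getD j 0))) acc) matr
  -- second loop: matr[i][0] = matrix[i][len(matr[0]) - 1]
  (List.range matrix.length).foldl (fun acc i =>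
    acc.set i ((acc.getD i []).set 0 ((matrix.getD i []).getD ((acc.getD 0 []).length - 1) 0))) matr

-- ===== PORT B =====
-- [row[-1]] + row[:-1] per row; pyGet? is none exactly where Python raises IndexError
-- (an empty row, outside Pre_), and Option.toList then contributes nothing
def step_right_alt (matrix : List (List Int)) : List (List Int) :=
  matrix.map (fun row =>
    (PySem.List.pyGet? row (-1)).toList ++ PySem.List.slice row none (some (-1)))

-- ===== PRECONDITION & SPEC =====
-- Pre_ excludes non-rectangular matrices and matrices with empty rows: on a row shorter than
-- the first (or empty) A raises IndexError, and on a row longer than the first A's value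
-- (rotating only the first-row-width prefix) and B's (rotating each full row) are both
-- defensible readings of an unspecified non-matrix input.
def Pre_step_right (matrix : List (List Int)) : Prop :=
  ∀ row ∈ matrix, row ≠ [] ∧ row.length = (matrix.headD []).length
instance (matrix : List (List Int)) : Decidable (Pre_step_right matrix) := by
  unfold Pre_step_right; infer_instance
def pvWitness_step_right : List (List Int) := [[1, 2], [3, 4]]

def Spec_step_right (matrix : List (List Int)) (out : List (List Int)) : Prop := out = step_right_alt matrix
instance (matrix : List (List Int)) (out : List (List Int)) : Decidable (Spec_step_right matrix out) := by unfold Spec_step_right; infer_instance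

-- ===== CLAIM (what is proved, stated in full; the proofs are below) =====
def Claim_equal_step_right : Prop := ∀ (matrix : List (List Int)), Dom_step_right matrix → Pre_step_right matrix → Spec_step_right matrix (step_right matrix)

-- ===== LEMMAS AND PROOFS =====

-- the inner loop of A's first pass, acting on a single row: sets w[j+1] := r[j] for j < m-1
def pvShift (m : Nat) (r w : List Int) : List Int :=
  (List.range (m - 1)).foldl (fun w j => w.set (j+1) (r.getD j 0)) w

-- inner fold touches only row i
theorem pv_fold_set_row (l : List Nat) (i : Nat) (f : Nat → Int) (acc : List (List Int))
    (h : i < acc.length) :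
    l.foldl (fun a j => a.set i ((a.getD i []).set (j+1) (f j))) acc
      = acc.set i (l.foldl (fun w j => w.set (j+1) (f j)) (acc.getD i [])) := by
  induction l generalizing acc with
  | nil =>
      simp [List.getD_eq_getElem?_getD, List.getElem?_eq_getElem h]
  | cons j l ih =>
      simp only [List.foldl_cons]
      rw [ih _ (by simpa using h)]
      simp [List.getD_eq_getElem?_getD, h, List.set_set]

-- an outer fold over range n that rewrites row i from its current value
theorem pv_fold_rows_get? (F : Nat → List Int → List Int) (acc : List (List Int)) (n : Nat)
    (hn : n ≤ acc.length) : ∀ k : Nat,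
    ((List.range n).foldl (fun a i => a.set i (F i (a.getD i []))) acc)[k]?
      = if k < n then (acc[k]?).map (F k) else acc[k]? := by
  induction n with
  | zero => intro k; simp
  | succ n ih =>
      intro k
      rw [List.range_succ, List.foldl_append]
      simp only [List.foldl_cons, List.foldl_nil]
      have hlen : ∀ (l : List Nat) (a : List (List Int)),
          (l.foldl (fun a i => a.set i (F i (a.getD i []))) a).length = a.length := by
        intro l
        induction l with
        | nil => intro a; rfl
        | cons x l ih2 => intro a; rw [List.foldl_cons, ih2, List.length_set]
      have hv : ((List.range n).foldl (fun a i => a.set i (F i (a.getD i []))) acc).getD n []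
          = (acc.getD n []) := by
        rw [List.getD_eq_getElem?_getD, List.getD_eq_getElem?_getD, ih (by omega) n]
        simp
      rw [List.getElem?_set]
      rw [hlen, hv]
      by_cases hk : k = n
      · subst hk
        have hklt : k < acc.length := by omega
        simp [List.getD_eq_getElem?_getD, hklt]
      · rw [if_neg (fun h => hk h.symm)]
        rw [ih (by omega) k]
        by_cases h2 : k < n
        · rw [if_pos h2, if_pos (by omega)]
        · rw [if_neg h2, if_neg (by omega)]

-- foldl congruence under an invariant preserved by the loop body
theorem pv_foldl_inv_congr {α β : Type} (l : List β) (f g : α → β → α) (P : α → Prop)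
    (init : α) (h0 : P init)
    (hpres : ∀ a x, P a → x ∈ l → P (f a x))
    (heq : ∀ a x, P a → x ∈ l → f a x = g a x) :
    l.foldl f init = l.foldl g init := by
  induction l generalizing init with
  | nil => rfl
  | cons x l ih =>
      simp only [List.foldl_cons]
      rw [← heq init x h0 (by simp)]
      exact ih (f init x) (hpres init x h0 (by simp))
        (fun a y ha hy => hpres a y ha (by simp [hy]))
        (fun a y ha hy => heq a y ha (by simp [hy]))

-- characterisation of pvShift on a row of length m
theorem pv_shift_get? (m : Nat) (r : List Int) (hr : m ≤ r.length) (k : Nat) :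
    (pvShift m r r)[k]? = if 1 ≤ k ∧ k < m then r[k-1]? else r[k]? := by
  unfold pvShift
  have key : ∀ t, t ≤ m - 1 → ∀ k,
      ((List.range t).foldl (fun w j => w.set (j+1) (r.getD j 0)) r)[k]?
        = if 1 ≤ k ∧ k ≤ t then r[k-1]? else r[k]? := by
    intro t ht
    induction t with
    | zero => intro k; simp; intro h1 h2; omega
    | succ t ih =>
        intro k
        rw [List.range_succ, List.foldl_append]
        simp only [List.foldl_cons, List.foldl_nil]
        have hlen : ∀ (l : List Nat) (w : List Int),
            (l.foldl (fun w j => w.set (j+1) (r.getD j 0)) w).length = w.length := by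
          intro l
          induction l with
          | nil => intro w; rfl
          | cons x l ihl => intro w; rw [List.foldl_cons, ihl, List.length_set]
        rw [List.getElem?_set, hlen]
        by_cases hk : k = t + 1
        · subst hk
          rw [if_pos rfl, if_pos (show t + 1 < r.length by omega),
            if_pos (show 1 ≤ t + 1 ∧ t + 1 ≤ t + 1 by omega)]
          simp [List.getD_eq_getElem?_getD, List.getElem?_eq_getElem (show t < r.length by omega)]
        · rw [if_neg (fun h => hk h.symm), ih (by omega)]
          by_cases h2 : 1 ≤ k ∧ k ≤ t
          · rw [if_pos h2, if_pos ⟨h2.1, by omega⟩]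
          · rw [if_neg h2, if_neg (by omega)]
  have := key (m - 1) (le_refl _) k
  rw [this]
  by_cases h : 1 ≤ k ∧ k < m
  · rw [if_pos (by omega), if_pos h]
  · rw [if_neg (by omega), if_neg h]

-- outer set-fold preserves the outer length
theorem pv_fold_set_length (F : Nat → List Int → List Int) (l : List Nat)
    (acc : List (List Int)) :
    (l.foldl (fun a i => a.set i (F i (a.getD i []))) acc).length = acc.length := by
  induction l generalizing acc with
  | nil => rfl
  | cons x l ih => rw [List.foldl_cons, ih, List.length_set]

-- the inner set-fold preserves the row length
theorem pv_setfold_length (g : Nat → Int) (l : List Nat) (w : List Int) :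
    (l.foldl (fun w j => w.set (j+1) (g j)) w).length = w.length := by
  induction l generalizing w with
  | nil => rfl
  | cons x l ih => rw [List.foldl_cons, ih, List.length_set]

-- one row, both ways: A's shift-then-wrap (width m = the row's length) is the row's last
-- element consed onto everything but the last — B's [row[-1]] + row[:-1]
theorem pv_row (m : Nat) (row : List Int) (hm : 1 ≤ m) (h : m = row.length) :
    (pvShift m row row).set 0 (row.getD (m-1) 0)
      = (PySem.List.pyGet? row (-1)).toList ++ PySem.List.slice row none (some (-1)) := by
  have hle : m ≤ row.length := le_of_eq h
  have hR : (PySem.List.pyGet? row (-1)).toList ++ PySem.List.slice row none (some (-1))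
      = row.getD (m-1) 0 :: (row.take (m-1) ++ row.drop m) := by
    rw [PySem.List.pyGet?_neg_one, PySem.List.slice_to_neg_one,
      List.getLast?_eq_getElem?, List.dropLast_eq_take,
      List.getElem?_eq_getElem (show row.length - 1 < row.length by omega)]
    simp [List.getD_eq_getElem?_getD,
      List.getElem?_eq_getElem (show m - 1 < row.length by omega), ← h,
      List.drop_eq_nil_of_le (le_of_eq h.symm)]
  rw [hR]
  have hlenS : (pvShift m row row).length = row.length := by
    unfold pvShift; rw [pv_setfold_length]
  apply List.ext_getElem?
  intro k
  rw [List.getElem?_set]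
  by_cases hk0 : k = 0
  · subst hk0
    rw [if_pos rfl, if_pos (by omega : (0:Nat) < (pvShift m row row).length)]
    rfl
  · rw [if_neg (fun hh => hk0 hh.symm), pv_shift_get? m row hle k]
    obtain ⟨k, rfl⟩ : ∃ j, k = j + 1 := ⟨k - 1, by omega⟩
    rw [List.getElem?_cons_succ]
    have htl : (row.take (m-1)).length = m - 1 := by simp; omega
    by_cases hk : 1 ≤ k + 1 ∧ k + 1 < m
    · rw [if_pos hk]
      rw [List.getElem?_append_left (by omega)]
      rw [List.getElem?_take_of_lt (by omega)]
      simp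
    · rw [if_neg hk]
      have hkm : m ≤ k + 1 := by omega
      rw [List.getElem?_append_right (by omega)]
      rw [List.getElem?_drop]
      congr 1
      omega

-- A's whole computation, row by row
theorem pv_A_char (matrix : List (List Int)) (hpre : Pre_step_right matrix) :
    step_right matrix = step_right_alt matrix := by
  cases matrix with
  | nil => rfl
  | cons r rs =>
    set M : List (List Int) := r :: rs with hM
    have hm1 : 1 ≤ r.length := by
      have := hpre r (by simp [hM])
      rcases this with ⟨hne, -⟩
      cases r with
      | nil => exact absurd rfl hne
      | cons a l => simp
    have hrowlen : ∀ row ∈ M, row.length = r.length := by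
      intro row hrow
      have := (hpre row hrow).2
      simpa [hM] using this
    set n := M.length with hn
    set m := r.length with hmdef
    have hhead : (M.headD []).length = m := by simpa [hM] using hmdef.symm
    unfold step_right
    simp only [hhead]
    -- rewrite the first pass into set-of-current-row form
    set F : Nat → List Int → List Int :=
      fun i w => (List.range (m - 1)).foldl (fun w j => w.set (j+1) ((M.getD i []).getD j 0)) w
      with hF
    have h1 : (List.range M.length).foldl (fun acc i =>
        (List.range (m - 1)).foldl (fun acc2 j =>
          acc2.set i ((acc2.getD i []).set (j+1) ((M.getD i []).getD j 0))) acc) M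
        = (List.range M.length).foldl (fun a i => a.set i (F i (a.getD i []))) M := by
      apply pv_foldl_inv_congr _ _ _ (fun a => a.length = M.length) _ rfl
      · intro a i hP hi
        rw [pv_fold_set_row _ _ _ _ (by rw [hP]; exact List.mem_range.mp hi)]
        rw [List.length_set]
        exact hP
      · intro a i hP hi
        rw [pv_fold_set_row _ _ _ _ (by rw [hP]; exact List.mem_range.mp hi)]
    rw [h1]
    set matr1 := (List.range M.length).foldl (fun a i => a.set i (F i (a.getD i []))) M
      with hmatr1
    have hlen1 : matr1.length = M.length := pv_fold_set_length _ _ _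
    have hget1 : ∀ k, matr1[k]? = if k < M.length then (M[k]?).map (F k) else M[k]? := by
      intro k
      rw [hmatr1, pv_fold_rows_get? F M M.length (le_refl _) k]
    have hFlen : ∀ i w, (F i w).length = w.length := by
      intro i w; rw [hF]; exact pv_setfold_length _ _ _
    have hrow1 : ∀ k, k < M.length → matr1.getD k [] = F k (M.getD k []) := by
      intro k hk
      rw [List.getD_eq_getElem?_getD, List.getD_eq_getElem?_getD, hget1 k, if_pos hk,
        List.getElem?_eq_getElem (show k < M.length from hk)]
      rfl
    have hrow1len : (matr1.getD 0 []).length = m := by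
      rw [hrow1 0 (by simp [hM]), hFlen]
      simpa [hM] using hmdef.symm
    -- rewrite the second pass
    set G : Nat → List Int → List Int :=
      fun i w => w.set 0 ((M.getD i []).getD (m - 1) 0) with hG
    have h2 : (List.range M.length).foldl (fun acc i =>
        acc.set i ((acc.getD i []).set 0 ((M.getD i []).getD ((acc.getD 0 []).length - 1) 0))) matr1
        = (List.range M.length).foldl (fun a i => a.set i (G i (a.getD i []))) matr1 := by
      apply pv_foldl_inv_congr _ _ _
        (fun a => a.length = M.length ∧ (a.getD 0 []).length = m) _ ⟨hlen1, hrow1len⟩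
      · intro a i hP hi
        constructor
        · rw [List.length_set]; exact hP.1
        · rcases hP with ⟨hPl, hP0⟩
          rw [List.getD_eq_getElem?_getD, List.getElem?_set]
          by_cases hi0 : i = 0
          · subst hi0
            rw [if_pos rfl, if_pos (by rw [hPl]; exact List.mem_range.mp hi)]
            simpa [List.getD_eq_getElem?_getD] using hP0
          · rw [if_neg hi0, ← List.getD_eq_getElem?_getD]
            exact hP0
      · intro a i hP hi
        rw [hG, hP.2]
    rw [h2]
    -- now compare with B element-wise
    apply List.ext_getElem?
    intro k
    rw [pv_fold_rows_get? G matr1 M.length (by rw [hlen1]) k]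
    unfold step_right_alt
    rw [List.getElem?_map]
    by_cases hk : k < M.length
    · rw [if_pos hk, hget1 k, if_pos hk,
        List.getElem?_eq_getElem (show k < M.length from hk)]
      simp only [Option.map_some]
      congr 1
      have hrowmem : M[k] ∈ M := List.getElem_mem _
      have hrl : m = (M[k]).length := (hrowlen _ hrowmem).symm
      have hB := pv_row m (M[k]) (by omega) hrl
      have hFeq : F k (M[k]) = pvShift m (M[k]) (M[k]) := by
        rw [hF]
        unfold pvShift
        simp [List.getD_eq_getElem?_getD, List.getElem?_eq_getElem (show k < M.length from hk)]
      have hGeq : G k (F k (M[k])) = (pvShift m (M[k]) (M[k])).set 0 ((M[k]).getD (m-1) 0) := by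
        rw [hG, hFeq]
        simp [List.getD_eq_getElem?_getD, List.getElem?_eq_getElem (show k < M.length from hk)]
      rw [hGeq, hB]
    · rw [if_neg hk, hget1 k, if_neg hk,
        List.getElem?_eq_none (by omega : M.length ≤ k)]
      rfl

-- ===== VERDICT (by name: the statement is the Claim_ definition above) =====
theorem step_right_spec : Claim_equal_step_right := by
  intro matrix _ hpre
  unfold Spec_step_right
  exact pv_A_char matrix hpre
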